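-- pv_equiv track=rewrite | github.com/abdullah-an2108536/Python-CMPS151-ProgrammingConcepts | Final Exam/1.py | ispolish
-- ===== SOURCE A (Python) =====
-- def ispolish(n):
--     if n <= 0:  # no zero
--         return False
--     n = str(n)
--     listn = list(n)
--     sumodd = 0
--     sumeven = 0
--     for i in listn:
--         if int(i) % 2 == 0:
--             sumeven += int(i)  # dont forget int()
--         else:
--             sumodd += int(i)
--     if sumodd == sumeven:
--         return True
--     else:
--         return False
-- ===== SOURCE B (Python) =====
-- def ispolish(n):
--     if n <= 0:  # no zero
--         return False
--     sumeven = 0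
--     sumodd = 0
--     while n > 0:
--         d = n % 10
--         n //= 10
--         if d % 2 == 0:
--             sumeven += d
--         else:
--             sumodd += d
--     return sumeven == sumodd
-- ===== Notes on version B (the rewrite author's own statement) =====
-- stated objective: idiomatic
-- what changed: B extracts digits arithmetically with modulo and floor-division in a while loop instead of converting the number to a string and re-parsing each character with int().
import Mathlib
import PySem

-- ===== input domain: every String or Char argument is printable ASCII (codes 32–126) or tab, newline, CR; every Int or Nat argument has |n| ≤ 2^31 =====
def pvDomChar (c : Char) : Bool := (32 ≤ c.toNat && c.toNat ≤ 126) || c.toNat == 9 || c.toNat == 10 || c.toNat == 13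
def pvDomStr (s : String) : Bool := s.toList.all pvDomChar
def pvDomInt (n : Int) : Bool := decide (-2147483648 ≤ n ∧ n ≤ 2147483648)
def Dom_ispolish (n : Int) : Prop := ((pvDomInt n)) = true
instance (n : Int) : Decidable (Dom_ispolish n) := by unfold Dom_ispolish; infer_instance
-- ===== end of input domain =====

-- B replaces A's string conversion + per-character int() parsing by arithmetic digit
-- extraction (modulo, floor-division) in a while loop; return value only, no side effects involved.

-- ===== PORT A =====
def ispolish (n : Int) : Bool :=
  if n ≤ 0 then false
  else
    let s := PySem.Int.toStr n          -- n = str(n)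
    let listn := s.toList               -- listn = list(n)
    let r := listn.foldl (fun (st : Int × Int) i =>
        -- int(i): every char of str(n) for n > 0 is a decimal digit, so int() never raises;
        -- the .getD 0 default is unreachable (proved below), making this step exact.
        let v := (PySem.Int.ofChars? [i]).getD 0
        if PySem.Int.mod v 2 == 0 then (st.1, st.2 + v) else (st.1 + v, st.2))
      (0, 0)                            -- (sumodd, sumeven)
    if r.1 == r.2 then true else false

-- ===== PORT B =====
-- termination lemma for the while loop (cited by decreasing_by)
theorem pv_floordiv_toNat_lt (n : Int) (hpos0 : ¬ n ≤ 0) :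
    (PySem.Int.floordiv n 10).toNat < n.toNat := by
  have h0 : 0 < n := lt_of_not_ge hpos0
  have : PySem.Int.floordiv n 10 = n / 10 := by
    simp [PySem.Int.floordiv, Int.fdiv_eq_ediv_of_nonneg _ (by norm_num : (0:Int) ≤ 10)]
  rw [this]
  omega

def ispolish_altLoop (n se so : Int) : Bool :=
  if h : n ≤ 0 then se == so            -- while n > 0:
  else
    let d := PySem.Int.mod n 10         -- d = n % 10
    let n' := PySem.Int.floordiv n 10   -- n //= 10
    if PySem.Int.mod d 2 == 0 then
      ispolish_altLoop n' (se + d) so   -- sumeven += d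
    else
      ispolish_altLoop n' se (so + d)   -- sumodd += d
termination_by n.toNat
decreasing_by all_goals exact pv_floordiv_toNat_lt n h

def ispolish_alt (n : Int) : Bool :=
  if n ≤ 0 then false
  else ispolish_altLoop n 0 0

-- ===== PRECONDITION & SPEC =====
def Spec_ispolish (n : Int) (out : Bool) : Prop := out = ispolish_alt n
instance (n : Int) (out : Bool) : Decidable (Spec_ispolish n out) := by unfold Spec_ispolish; infer_instance

-- ===== CLAIM (what is proved, stated in full; the proofs are below) =====
def Claim_equal_ispolish : Prop := ∀ (n : Int), Dom_ispolish n → Spec_ispolish n (ispolish n)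

-- ===== LEMMAS AND PROOFS =====

-- even- and odd-digit sums of a digit list, as Int
def pvEvenSum (l : List Nat) : Int := ((l.filter (fun d => d % 2 = 0)).sum : Nat)
def pvOddSum (l : List Nat) : Int := ((l.filter (fun d => ¬ d % 2 = 0)).sum : Nat)

theorem pv_toDigitsCore_eq (f : Nat) : ∀ (n : Nat) (acc : List Char), 0 < n → n < f →
    Nat.toDigitsCore 10 f n acc = ((Nat.digits 10 n).map Nat.digitChar).reverse ++ acc := by
  induction f with
  | zero => intro n acc h hf; omega
  | succ f ih =>
    intro n acc h hf
    rw [Nat.toDigitsCore]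
    rw [Nat.digits_def' (by norm_num : (1:Nat) < 10) h]
    simp only [List.map_cons, List.reverse_cons, List.append_assoc, List.singleton_append]
    by_cases h10 : n / 10 = 0
    · simp [h10]
    · simp only [h10, if_false]
      rw [ih (n / 10) _ (Nat.pos_of_ne_zero h10) (by omega)]

theorem pv_toChars_pos (n : Int) (h : 0 < n) :
    PySem.Int.toChars n = ((Nat.digits 10 n.toNat).map Nat.digitChar).reverse := by
  have : ¬ n < 0 := by omega
  simp only [PySem.Int.toChars, this, if_false]
  have hpos : 0 < n.toNat := by omega
  have := pv_toDigitsCore_eq (n.toNat + 1) n.toNat [] hpos (by omega)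
  simpa [Nat.toDigits] using this

theorem pv_ofChars_digitChar (d : Nat) (hd : d < 10) :
    (PySem.Int.ofChars? [Nat.digitChar d]).getD 0 = (d : Int) := by
  interval_cases d <;> decide

theorem pv_mod_two (d : Nat) :
    (PySem.Int.mod (d : Int) 2 == 0) = decide (d % 2 = 0) := by
  have h : PySem.Int.mod (d : Int) 2 = ((d % 2 : Nat) : Int) := by
    simp only [PySem.Int.mod, Int.fmod_eq_emod_of_nonneg _ (by norm_num : (0:Int) ≤ 2)]
    omega
  rw [h]
  by_cases hd : d % 2 = 0
  · simp [hd]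
  · have h1 : d % 2 = 1 := by omega
    simp [h1]

-- A's loop over mapped digit characters computes the (odd, even) digit sums
theorem pv_foldA (l : List Nat) (hl : ∀ d ∈ l, d < 10) : ∀ (so se : Int),
    (l.map Nat.digitChar).foldl (fun (st : Int × Int) i =>
        let v := (PySem.Int.ofChars? [i]).getD 0
        if PySem.Int.mod v 2 == 0 then (st.1, st.2 + v) else (st.1 + v, st.2))
      (so, se) = (so + pvOddSum l, se + pvEvenSum l) := by
  induction l with
  | nil => intro so se; simp [pvOddSum, pvEvenSum]
  | cons d l ih =>
    intro so se
    have hd : d < 10 := hl d (List.mem_cons_self ..)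
    have hl' : ∀ x ∈ l, x < 10 := fun x hx => hl x (List.mem_cons_of_mem _ hx)
    simp only [List.map_cons, List.foldl_cons, pv_ofChars_digitChar d hd, pv_mod_two]
    by_cases h : d % 2 = 0
    · simp only [h, decide_true, if_true]
      rw [ih hl']
      simp [pvEvenSum, pvOddSum, h]
      ring
    · have h1 : d % 2 = 1 := by omega
      simp only [h, decide_false]
      rw [ih hl']
      simp [pvEvenSum, pvOddSum, h1]
      ring

-- B's loop computes the same sums from the little-endian digits
theorem pv_loopB (m : Nat) : ∀ (se so : Int),
    ispolish_altLoop (m : Int) se so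
      = (se + pvEvenSum (Nat.digits 10 m) == so + pvOddSum (Nat.digits 10 m)) := by
  induction m using Nat.strong_induction_on with
  | _ m ih =>
    intro se so
    rw [ispolish_altLoop]
    by_cases h : m = 0
    · simp [h, pvEvenSum, pvOddSum]
    · have hm : ¬ (m : Int) ≤ 0 := by omega
      have hmod : PySem.Int.mod (m : Int) 10 = ((m % 10 : Nat) : Int) := by
        simp only [PySem.Int.mod, Int.fmod_eq_emod_of_nonneg _ (by norm_num : (0:Int) ≤ 10)]
        omega
      have hdiv : PySem.Int.floordiv (m : Int) 10 = ((m / 10 : Nat) : Int) := by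
        simp only [PySem.Int.floordiv, Int.fdiv_eq_ediv_of_nonneg _ (by norm_num : (0:Int) ≤ 10)]
        omega
      have hlt := Nat.div_lt_self (Nat.pos_of_ne_zero h) (by norm_num : 1 < 10)
      rw [dif_neg hm]
      simp only [hmod, hdiv, pv_mod_two (m % 10)]
      rw [Nat.digits_def' (by norm_num : (1:Nat) < 10) (Nat.pos_of_ne_zero h)]
      by_cases hp : m % 10 % 2 = 0
      · simp only [hp, decide_true, if_true]
        rw [ih (m / 10) hlt]
        simp [pvEvenSum, pvOddSum, hp]
        ring_nf
      · have h1 : m % 10 % 2 = 1 := by omega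
        simp only [hp, decide_false, Bool.false_eq_true, if_false]
        rw [ih (m / 10) hlt]
        simp [pvEvenSum, pvOddSum, h1]
        ring_nf

-- ===== VERDICT (by name: the statement is the Claim_ definition above) =====
theorem ispolish_spec : Claim_equal_ispolish := by
  unfold Claim_equal_ispolish
  intro n _
  unfold Spec_ispolish ispolish ispolish_alt
  by_cases h : n ≤ 0
  · simp [h]
  · have hpos : 0 < n := lt_of_not_ge h
    simp only [h, if_false]
    rw [show (PySem.Int.toStr n).toList = PySem.Int.toChars n from PySem.Int.toList_toStr n,
      pv_toChars_pos n hpos]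
    have hlt : ∀ d ∈ (Nat.digits 10 n.toNat).reverse, d < 10 := by
      intro d hd
      exact Nat.digits_lt_base (by norm_num) (List.mem_reverse.mp hd)
    rw [← List.map_reverse, pv_foldA _ hlt 0 0]
    have hn : ((n.toNat : Int)) = n := by omega
    have hB := pv_loopB n.toNat 0 0
    rw [hn] at hB
    rw [hB]
    have he : pvEvenSum ((Nat.digits 10 n.toNat).reverse) = pvEvenSum (Nat.digits 10 n.toNat) := by
      simp [pvEvenSum, List.filter_reverse]
    have ho : pvOddSum ((Nat.digits 10 n.toNat).reverse) = pvOddSum (Nat.digits 10 n.toNat) := by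
      simp [pvOddSum, List.filter_reverse]
    rw [he, ho]
    by_cases hq : pvOddSum (Nat.digits 10 n.toNat) = pvEvenSum (Nat.digits 10 n.toNat)
    · simp [hq]
    · simp [hq, Ne.symm hq, zero_add]
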